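-- pv_equiv track=rewrite | github.com/laveena01/drive_llm | llm_driving/inference_.py | _extract_brake_percent
-- ===== SOURCE A (Python) =====
-- def _extract_brake_percent(text: str):
--     t = text.lower()
--     key = "brake pedal:"
--     if key not in t:
--         return None
--     after = t.split(key, 1)[1].strip()
--     num = ""
--     for ch in after:
--         if ch.isdigit():
--             num += ch
--         else:
--             break
--     return int(num) if num else None
-- ===== SOURCE B (Python) =====
-- def _extract_brake_percent(text: str):
--     key = "brake pedal:"
--     it = iter(text.lower())
--     # Phase 1: streaming match of the key (state j = chars of key currently matched;
--     # on mismatch the only possible restart is j=1 on 'b', since 'b' occurs only at key[0]).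
--     j = 0
--     for c in it:
--         if c == key[j]:
--             j += 1
--             if j == len(key):
--                 break
--         else:
--             j = 1 if c == key[0] else 0
--     else:
--         return None
--     # Phase 2: same iterator — skip leading whitespace, then collect the digit run.
--     num = []
--     for c in it:
--         if c.isdigit():
--             num.append(c)
--         elif not num and c.isspace():
--             continue
--         else:
--             break
--     return int("".join(num)) if num else None
-- ===== Notes on version B (the rewrite author's own statement) =====
-- stated objective: alternative
-- what changed: Replaces A's substring search + split + strip over materialised substrings with a single left-to-right pass over one character iterator: a constant-space streaming automaton matches the key (exploiting that 'b' occurs only at the key's first position, so the only restart state is 1), then the same iterator skips leading whitespace and collects the digit run; no slice, split or strip is ever taken.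
import Mathlib
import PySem

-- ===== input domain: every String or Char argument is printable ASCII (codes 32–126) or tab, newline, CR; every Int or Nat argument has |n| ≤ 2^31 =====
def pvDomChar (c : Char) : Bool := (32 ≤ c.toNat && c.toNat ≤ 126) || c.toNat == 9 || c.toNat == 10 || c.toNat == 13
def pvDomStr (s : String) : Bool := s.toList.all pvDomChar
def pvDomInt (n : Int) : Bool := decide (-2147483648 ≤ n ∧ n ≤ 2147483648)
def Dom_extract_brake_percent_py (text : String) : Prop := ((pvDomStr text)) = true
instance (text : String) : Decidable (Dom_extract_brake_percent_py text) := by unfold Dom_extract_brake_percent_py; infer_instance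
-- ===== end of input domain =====

-- B replaces A's substring search + split + strip over materialised substrings with a single
-- left-to-right pass: a streaming automaton matches the key, then the same stream skips leading
-- whitespace and collects the digit run (objective: alternative).

-- ===== PORT A =====
-- 'for ch in after: if ch.isdigit(): num += ch else: break'  (string accumulator, break on first non-digit)
def pvALoop (num : List Char) : List Char → List Char
  | [] => num
  | c :: rest => if PySem.Chars.isdigit c then pvALoop (num ++ [c]) rest else num

def extract_brake_percent_py (text : String) : Option Int :=
  let t := PySem.Chars.lower text.toList
  let key := "brake pedal:".toList
  if ¬ (PySem.Chars.isIn key t) then none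
  else
    match PySem.Chars.splitMax? t key 1 with
    | none => none            -- unreachable: key ≠ '' (split is none only for an empty separator)
    | some parts =>
      match PySem.List.pyGet? parts 1 with
      | none => none          -- unreachable: key occurs in t, so the split has a second piece
      | some piece =>
        let after := PySem.Chars.strip piece
        let num := pvALoop [] after
        if num = [] then none else PySem.Int.ofChars? num

-- ===== PORT B =====
def pvKey : List Char := "brake pedal:".toList

-- Phase-1 loop: 'if c == key[j]: j += 1; if j == len(key): break  else: j = 1 if c == key[0] else 0'
-- (returns the unconsumed remainder of the stream; none = iterator exhausted without a full match)
def pvMatch : Nat → List Char → Option (List Char)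
  | _, [] => none
  | j, c :: rest =>
      if c = pvKey.getD j ' ' then
        if j + 1 = pvKey.length then some rest else pvMatch (j + 1) rest
      else if c = pvKey.getD 0 ' ' then pvMatch 1 rest
      else pvMatch 0 rest

-- Phase-2 loop: 'if c.isdigit(): num.append(c)  elif not num and c.isspace(): continue  else: break'
def pvDigits : List Char → List Char → List Char
  | num, [] => num
  | num, c :: rest =>
      if PySem.Chars.isdigit c then pvDigits (num ++ [c]) rest
      else if num = [] ∧ PySem.Chars.isspace c then pvDigits num rest
      else num

def extract_brake_percent_py_alt (text : String) : Option Int :=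
  match pvMatch 0 (PySem.Chars.lower text.toList) with
  | none => none
  | some rest =>
    let num := pvDigits [] rest
    if num = [] then none else PySem.Int.ofChars? num

-- ===== PRECONDITION & SPEC =====
def Spec_extract_brake_percent_py (text : String) (out : Option Int) : Prop := out = extract_brake_percent_py_alt text
instance (text : String) (out : Option Int) : Decidable (Spec_extract_brake_percent_py text out) := by unfold Spec_extract_brake_percent_py; infer_instance

-- ===== CLAIM (what is proved, stated in full; the proofs are below) =====
def Claim_equal_extract_brake_percent_py : Prop := ∀ (text : String), Dom_extract_brake_percent_py text → Spec_extract_brake_percent_py text (extract_brake_percent_py text)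

-- ===== LEMMAS AND PROOFS =====

-- Reference scanner used only in the proofs: try the key at every offset, left to right.
def pvRef : List Char → Option (List Char)
  | [] => none
  | c :: rest => if pvKey.isPrefixOf (c :: rest) then some ((c :: rest).drop pvKey.length) else pvRef rest

theorem pvKey_len : pvKey.length = 12 := by decide

theorem pvKey_drop_cons : ∀ j < 12, pvKey.drop j = pvKey.getD j ' ' :: pvKey.drop (j + 1) := by decide

theorem pvKey_not_b : ∀ j < 12, 1 ≤ j → pvKey.getD j ' ' ≠ pvKey.getD 0 ' ' := by decide

theorem pvKey_drop_ne_nil : ∀ j < 12, pvKey.drop j ≠ [] := by decide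

-- The automaton agrees with the reference scanner (state j: the last j chars read are key[0..j)).
theorem pvMatch_eq (r : List Char) :
    pvMatch 0 r = pvRef r ∧
    ∀ j, 1 ≤ j → j < 12 →
      pvMatch j r = if pvKey.drop j <+: r then some (r.drop (12 - j)) else pvRef r := by
  induction r with
  | nil =>
    constructor
    · rfl
    · intro j h1 h12
      rw [if_neg]
      · rfl
      · simpa [List.prefix_nil] using pvKey_drop_ne_nil j h12
  | cons c rest ih =>
    obtain ⟨ih0, ihj⟩ := ih
    have hcons : ∀ j, j < 12 → (pvKey.drop j <+: c :: rest ↔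
        (pvKey.getD j ' ' = c ∧ pvKey.drop (j + 1) <+: rest)) := by
      intro j hj
      rw [pvKey_drop_cons j hj, List.cons_prefix_cons]
    have hb : pvKey = pvKey.getD 0 ' ' :: pvKey.drop 1 := pvKey_drop_cons 0 (by norm_num)
    -- pvRef (c :: rest) in the two head cases
    have href_b : c = pvKey.getD 0 ' ' →
        pvRef (c :: rest) = if pvKey.drop 1 <+: rest then some (rest.drop 11) else pvRef rest := by
      intro hc
      have : pvKey <+: c :: rest ↔ pvKey.drop 1 <+: rest := by
        nth_rewrite 1 [hb]
        rw [List.cons_prefix_cons]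
        simp [hc]
      simp only [pvRef, List.isPrefixOf_iff_prefix, pvKey_len]
      rw [List.drop_succ_cons]
      split_ifs with h1 h2 h2 <;> first
        | rfl
        | (exact absurd (this.mpr h2) h1)
        | (exact absurd (this.mp h1) h2)
    have href_nb : c ≠ pvKey.getD 0 ' ' → pvRef (c :: rest) = pvRef rest := by
      intro hc
      have : ¬ pvKey <+: c :: rest := by
        nth_rewrite 1 [hb]
        rw [List.cons_prefix_cons]
        exact fun h => hc h.1.symm
      simp only [pvRef, List.isPrefixOf_iff_prefix]
      rw [if_neg this]
    constructor
    · -- state 0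
      show (if c = pvKey.getD 0 ' ' then
          if 0 + 1 = pvKey.length then some rest else pvMatch (0 + 1) rest
        else if c = pvKey.getD 0 ' ' then pvMatch 1 rest else pvMatch 0 rest) = pvRef (c :: rest)
      by_cases hc : c = pvKey.getD 0 ' '
      · rw [if_pos hc, if_neg (by rw [pvKey_len]; omega),
          ihj 1 (by omega) (by omega), href_b hc]
      · rw [if_neg hc, if_neg hc, ih0, href_nb hc]
    · -- states 1..11
      intro j h1 h12
      show (if c = pvKey.getD j ' ' then
          if j + 1 = pvKey.length then some rest else pvMatch (j + 1) rest
        else if c = pvKey.getD 0 ' ' then pvMatch 1 rest else pvMatch 0 rest) =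
        if pvKey.drop j <+: c :: rest then some ((c :: rest).drop (12 - j)) else pvRef (c :: rest)
      by_cases hc : c = pvKey.getD j ' '
      · rw [if_pos hc]
        have hpre : pvKey.drop j <+: c :: rest ↔ pvKey.drop (j + 1) <+: rest := by
          rw [hcons j h12]; simp [hc]
        by_cases hj11 : j + 1 = 12
        · rw [if_pos (by rw [pvKey_len]; omega)]
          have hd : pvKey.drop (j + 1) = [] := by rw [hj11]; decide
          rw [if_pos (hpre.mpr (by rw [hd]; exact List.nil_prefix)),
            show 12 - j = 1 by omega, List.drop_one, List.tail_cons]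
        · rw [if_neg (by rw [pvKey_len]; omega), ihj (j + 1) (by omega) (by omega)]
          have hne : c ≠ pvKey.getD 0 ' ' := by
            rw [hc]; exact pvKey_not_b j h12 h1
          rw [href_nb hne]
          by_cases hp : pvKey.drop (j + 1) <+: rest
          · rw [if_pos hp, if_pos (hpre.mpr hp),
              show 12 - j = (12 - (j + 1)) + 1 by omega, List.drop_succ_cons]
          · rw [if_neg hp, if_neg (fun h => hp (hpre.mp h))]
      · -- mismatch
        rw [if_neg hc]
        have hnp : ¬ pvKey.drop j <+: c :: rest := by
          rw [hcons j h12]; exact fun h => hc h.1.symm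
        rw [if_neg hnp]
        by_cases hcb : c = pvKey.getD 0 ' '
        · rw [if_pos hcb, ihj 1 (by omega) (by omega), href_b hcb]
        · rw [if_neg hcb, ih0, href_nb hcb]

theorem pvRef_none : ∀ t : List Char, ¬ pvKey <:+: t → pvRef t = none := by
  intro t
  induction t with
  | nil => intro _; rfl
  | cons c rest ih =>
    intro h
    have hnp : ¬ pvKey <+: c :: rest := fun hp => h hp.isInfix
    have hni : ¬ pvKey <:+: rest := fun hi => h (hi.trans (List.suffix_cons c rest).isInfix)
    simp only [pvRef, List.isPrefixOf_iff_prefix]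
    rw [if_neg hnp]
    exact ih hni

theorem pvRef_found : ∀ (t : List Char) (n : Nat),
    pvKey <+: t.drop n → (∀ i, i < n → ¬ pvKey <+: t.drop i) → n ≤ t.length →
    pvRef t = some (t.drop (n + 12)) := by
  intro t
  induction t with
  | nil =>
    intro n hpre _ hle
    have hn : n = 0 := by simpa using hle
    subst hn
    simp only [List.drop_nil] at hpre
    exact absurd (List.prefix_nil.mp hpre) (by decide)
  | cons c rest ih =>
    intro n hpre hmin hle
    cases n with
    | zero =>
      have hp : pvKey.isPrefixOf (c :: rest) = true :=
        List.isPrefixOf_iff_prefix.mpr (by simpa using hpre)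
      simp only [pvRef, hp, if_true, pvKey_len]
    | succ m =>
      have hp : pvKey.isPrefixOf (c :: rest) = false := by
        rw [← Bool.not_eq_true, List.isPrefixOf_iff_prefix]
        simpa using hmin 0 (by omega)
      simp only [pvRef, hp, Bool.false_eq_true, if_false]
      rw [ih m (by simpa using hpre)
        (fun i hi => by simpa using hmin (i + 1) (by omega)) (by simpa using hle)]
      rw [show m + 1 + 12 = (m + 12) + 1 by omega, List.drop_succ_cons]

-- A's accumulation loop collects exactly the digit prefix.
theorem pvALoop_eq (y : List Char) : ∀ num, pvALoop num y = num ++ y.takeWhile PySem.Chars.isdigit := by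
  induction y with
  | nil => intro num; simp [pvALoop]
  | cons c rest ih =>
    intro num
    by_cases h : PySem.Chars.isdigit c
    · simp [pvALoop, h, ih]
    · simp [pvALoop, h]

theorem pv_isdigit_not_isspace (c : Char) (h : PySem.Chars.isspace c = true) :
    PySem.Chars.isdigit c = false := by
  have h0 : '0'.val.toNat = 48 := rfl
  have h9 : '9'.val.toNat = 57 := rfl
  simp only [PySem.Chars.isdigit, PySem.Chars.isspace, Char.le_def, UInt32.le_iff_toNat_le,
    Char.toNat] at *
  simp only [Bool.or_eq_true, Bool.and_eq_true, decide_eq_true_eq] at h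
  simp only [Bool.and_eq_false_iff, decide_eq_false_iff_not]
  omega

-- B's collection loop, once a digit has been taken: plain digit-prefix collection.
theorem pvDigits_ne (y : List Char) : ∀ num, num ≠ [] →
    pvDigits num y = num ++ y.takeWhile PySem.Chars.isdigit := by
  induction y with
  | nil => intro num _; simp [pvDigits]
  | cons c rest ih =>
    intro num hne
    by_cases h : PySem.Chars.isdigit c
    · simp [pvDigits, h, ih (num ++ [c]) (by simp)]
    · simp [pvDigits, h, hne]

-- B's collection loop from the empty accumulator: digit prefix after skipping leading whitespace.
theorem pvDigits_nil (y : List Char) :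
    pvDigits [] y = (PySem.Chars.lstrip y).takeWhile PySem.Chars.isdigit := by
  induction y with
  | nil => rfl
  | cons c rest ih =>
    by_cases h : PySem.Chars.isdigit c
    · have hs : PySem.Chars.isspace c = false := by
        by_contra hs
        rw [pv_isdigit_not_isspace c (by simpa using hs)] at h
        exact absurd h (by simp)
      simp [pvDigits, h, PySem.Chars.lstrip, hs, pvDigits_ne rest [c] (by simp)]
    · by_cases hs : PySem.Chars.isspace c
      · simp [pvDigits, h, hs, PySem.Chars.lstrip, ih]
      · simp [pvDigits, h, hs, PySem.Chars.lstrip]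

theorem pv_takeWhile_of_all_false {α : Type} (p : α → Bool) (l : List α)
    (h : ∀ x ∈ l, p x = false) : l.takeWhile p = [] := by
  cases l with
  | nil => rfl
  | cons a as => simp [h a (by simp)]

-- rstrip does not change the digit prefix (the stripped tail is whitespace, and no digit is whitespace).
theorem pv_takeWhile_rstrip (y : List Char) :
    (PySem.Chars.rstrip y).takeWhile PySem.Chars.isdigit = y.takeWhile PySem.Chars.isdigit := by
  have hy : PySem.Chars.rstrip y ++ (y.reverse.takeWhile PySem.Chars.isspace).reverse = y := by
    simp only [PySem.Chars.rstrip]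
    rw [← List.reverse_append, List.takeWhile_append_dropWhile, List.reverse_reverse]
  have hw : (y.reverse.takeWhile PySem.Chars.isspace).reverse.takeWhile PySem.Chars.isdigit = [] := by
    refine pv_takeWhile_of_all_false _ _ (fun x hx => ?_)
    exact pv_isdigit_not_isspace x (List.mem_takeWhile_imp (List.mem_reverse.mp hx))
  conv_rhs => rw [← hy]
  rw [List.takeWhile_append, hw]
  split_ifs with h
  · rw [List.append_nil]
    exact (List.takeWhile_prefix _).eq_of_length h
  · rfl

-- str.split(sep, maxsplit) helper, maxsplit exhausted: the whole remainder is the last piece.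
theorem pv_go_zero (sep : List Char) (fuel : Nat) (l cur : List Char) (acc : List (List Char)) :
    PySem.Chars.splitOnMax.go sep fuel 0 l cur acc = ((cur.reverse ++ l) :: acc).reverse := by
  cases fuel <;> cases l <;> simp [PySem.Chars.splitOnMax.go]

-- str.split(sep, 1) splits exactly at the first occurrence of sep:
-- if sep first occurs at index n, the pieces are the prefix before n and the remainder after n + len(sep).
theorem pv_go_found (sep : List Char) (hsep : sep ≠ []) :
    ∀ (l : List Char) (n fuel : Nat) (cur : List Char) (acc : List (List Char)),
      l.length < fuel → sep <+: l.drop n → (∀ i, i < n → ¬ sep <+: l.drop i) → n ≤ l.length →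
      PySem.Chars.splitOnMax.go sep fuel 1 l cur acc =
        (l.drop (n + sep.length) :: (cur.reverse ++ l.take n) :: acc).reverse := by
  intro l
  induction l with
  | nil =>
    intro n fuel cur acc _ hpre _ hle
    have hn : n = 0 := by simpa using hle
    subst hn
    simp only [List.drop_nil] at hpre
    exact absurd (List.prefix_nil.mp hpre) hsep
  | cons c rest ih =>
    intro n fuel cur acc hfuel hpre hmin hle
    obtain ⟨f, rfl⟩ : ∃ f, fuel = f + 1 := ⟨fuel - 1, by omega⟩
    cases n with
    | zero =>
      have hp : sep.isPrefixOf (c :: rest) = true := List.isPrefixOf_iff_prefix.mpr (by simpa using hpre)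
      simp only [PySem.Chars.splitOnMax.go, hp]
      simp only [if_true]
      rw [show (1 - 1 : Nat) = 0 from rfl, pv_go_zero]
      simp
    | succ m =>
      have hp : sep.isPrefixOf (c :: rest) = false := by
        rw [← Bool.not_eq_true, List.isPrefixOf_iff_prefix]
        simpa using hmin 0 (by omega)
      simp only [PySem.Chars.splitOnMax.go, hp]
      rw [if_neg (by omega), if_neg (by simp)]
      rw [ih m f (c :: cur) acc (by simpa using hfuel) (by simpa using hpre)
        (fun i hi => by simpa using hmin (i + 1) (by omega)) (by simpa using hle)]
      have h1 : (c :: rest).drop (m + 1 + sep.length) = rest.drop (m + sep.length) := by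
        rw [show m + 1 + sep.length = (m + sep.length) + 1 by omega, List.drop_succ_cons]
      have h2 : cur.reverse ++ (c :: rest).take (m + 1) = (c :: cur).reverse ++ rest.take m := by
        simp [List.take_succ_cons]
      rw [h1, h2]

-- ===== VERDICT (by name: the statement is the Claim_ definition above) =====
theorem extract_brake_percent_py_spec : Claim_equal_extract_brake_percent_py := by
  intro text _
  unfold Spec_extract_brake_percent_py
  simp only [extract_brake_percent_py, extract_brake_percent_py_alt]
  by_cases hin : PySem.Chars.isIn "brake pedal:".toList (PySem.Chars.lower text.toList)
  · -- key occurs: both sides parse the digit prefix after the first occurrence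
    set t := PySem.Chars.lower text.toList with ht
    set key := "brake pedal:".toList with hkeydef
    have hkey : key ≠ [] := by decide
    have hne : PySem.Chars.find t key ≠ -1 := by
      simpa [PySem.Chars.isIn, bne_iff_ne] using hin
    have hge : (0:Int) ≤ PySem.Chars.find t key := by
      have := PySem.Chars.neg_one_le_find t key
      omega
    obtain ⟨hpre, hmin⟩ := PySem.Chars.find_spec (s := t) (sub := key) hge
    have hnle : (PySem.Chars.find t key).toNat ≤ t.length := by
      have := PySem.Chars.find_le_length t key
      omega
    rw [if_neg (by simpa using hin)]
    -- A's split
    have hsplit : PySem.Chars.splitMax? t key 1 =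
        some (PySem.Chars.splitOnMax.go key (t.length + 1) 1 t [] []) := by
      simp [PySem.Chars.splitMax?, PySem.Chars.splitOnMax, hkey]
    rw [hsplit, pv_go_found key hkey t (PySem.Chars.find t key).toNat (t.length + 1) [] []
      (by omega) hpre (fun i hi => hmin i hi) hnle]
    -- B's automaton finds the same first occurrence
    have hmatch : pvMatch 0 t =
        some (t.drop ((PySem.Chars.find t key).toNat + 12)) := by
      rw [(pvMatch_eq t).1]
      exact pvRef_found t (PySem.Chars.find t key).toNat hpre (fun i hi => hmin i hi) hnle
    rw [hmatch]
    simp only [List.reverse_cons, List.reverse_nil, List.nil_append, List.singleton_append]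
    rw [show PySem.List.pyGet? [t.take (PySem.Chars.find t key).toNat,
        t.drop ((PySem.Chars.find t key).toNat + key.length)] (1 : Int) =
        some (t.drop ((PySem.Chars.find t key).toNat + key.length)) by
      simp [PySem.List.pyGet?, PySem.List.pyIdx?]]
    -- the two digit runs coincide
    have hkl : key.length = 12 := by decide
    rw [hkl]
    set x := t.drop ((PySem.Chars.find t key).toNat + 12) with hx
    have hstrip : (PySem.Chars.strip x).takeWhile PySem.Chars.isdigit =
        (PySem.Chars.lstrip x).takeWhile PySem.Chars.isdigit := by
      simp only [PySem.Chars.strip]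
      exact pv_takeWhile_rstrip (PySem.Chars.lstrip x)
    show (if pvALoop [] (PySem.Chars.strip x) = [] then none
        else PySem.Int.ofChars? (pvALoop [] (PySem.Chars.strip x))) =
      (if pvDigits [] x = [] then none else PySem.Int.ofChars? (pvDigits [] x))
    rw [pvALoop_eq, pvDigits_nil, List.nil_append, hstrip]
  · -- key absent: both return none
    rw [if_pos hin]
    have hni : ¬ pvKey <:+: PySem.Chars.lower text.toList := by
      have := PySem.Chars.isIn_eq_false_iff (sub := "brake pedal:".toList)
        (s := PySem.Chars.lower text.toList)
      exact (this.mp (by simpa using hin))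
    rw [(pvMatch_eq (PySem.Chars.lower text.toList)).1,
      pvRef_none (PySem.Chars.lower text.toList) hni]
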